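-- pv_equiv track=rewrite | github.com/pratikshadeo24/IncidentData-Augmentor | assignment2/assignment.py | calculate_incident_ranks
-- ===== SOURCE A (Python) =====
-- from collections import Counter
--
-- def calculate_incident_ranks(incidents):
--     # Calculate and return incident ranks based on incident nature
--     natures = [incident['incident_nature'] for incident in incidents]
--     nature_counts = Counter(natures)
--     ranked_natures = sorted(nature_counts.items(), key=lambda x: (-x[1], x[0]))
--
--     incident_ranks = {}
--     current_rank = 0
--     last_count = None
--     for i, (nature, count) in enumerate(ranked_natures, start=1):
--         if count != last_count:
--             current_rank = i
--         incident_ranks[nature] = current_rank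
--         last_count = count
--
--     return incident_ranks
-- ===== SOURCE B (Python) =====
-- from collections import Counter
--
-- def calculate_incident_ranks(incidents):
--     # Competition rank computed directly: 1 + number of natures with a
--     # strictly greater count (no enumerate/current_rank/last_count scan).
--     counts = Counter(incident['incident_nature'] for incident in incidents)
--     ranked = sorted(counts.items(), key=lambda x: (-x[1], x[0]))
--     return {nature: 1 + sum(1 for c in counts.values() if c > count)
--             for nature, count in ranked}
-- ===== Notes on version B (the rewrite author's own statement) =====
-- stated objective: simpler
-- what changed: B replaces A's enumerate scan with current_rank/last_count bookkeeping by computing each competition rank directly as 1 + the number of natures with strictly greater frequency, over the same sorted order.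
import Mathlib
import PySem

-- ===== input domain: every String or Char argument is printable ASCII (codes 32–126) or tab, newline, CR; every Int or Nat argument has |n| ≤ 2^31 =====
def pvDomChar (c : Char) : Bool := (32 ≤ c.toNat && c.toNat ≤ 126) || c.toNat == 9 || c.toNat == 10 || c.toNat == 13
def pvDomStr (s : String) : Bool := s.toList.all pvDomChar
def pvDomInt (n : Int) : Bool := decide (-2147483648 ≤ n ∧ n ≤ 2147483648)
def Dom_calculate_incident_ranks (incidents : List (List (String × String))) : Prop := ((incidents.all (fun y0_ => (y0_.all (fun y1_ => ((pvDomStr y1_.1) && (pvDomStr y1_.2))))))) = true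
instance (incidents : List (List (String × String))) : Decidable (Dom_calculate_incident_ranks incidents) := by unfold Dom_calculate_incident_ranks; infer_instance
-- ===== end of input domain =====

-- B computes each competition rank directly as 1 + #(natures with strictly greater count),
-- replacing A's enumerate/current_rank/last_count scan (objective: simpler).

-- ===== PORT A =====
-- the 'for i, (nature, count) in enumerate(ranked_natures, start=1)' loop, carried state (incident_ranks, current_rank, last_count)
def pvALoop : List (String × Int) → Int → PySem.Dict String Int → Int → Option Int → PySem.Dict String Int
  | [], _, incident_ranks, _, _ => incident_ranks
  | (nature, count) :: rest, i, incident_ranks, current_rank, last_count =>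
    let current_rank' := if some count ≠ last_count then i else current_rank
    pvALoop rest (i + 1) (incident_ranks.insert nature current_rank') current_rank' (some count)

def calculate_incident_ranks (incidents : List (List (String × String))) : List (String × Int) :=
  let natures := incidents.map (fun incident => ((PySem.Dict.mk incident).get? "incident_nature").getD "")
  let nature_counts := PySem.Dict.counter natures
  let ranked_natures := PySem.List.sorted2 nature_counts.items (fun x => -x.2) (fun x => x.1)
  (pvALoop ranked_natures 1 PySem.Dict.empty 0 none).items

-- ===== PORT B =====
def calculate_incident_ranks_alt (incidents : List (List (String × String))) : List (String × Int) :=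
  let counts := PySem.Dict.counter (incidents.map (fun incident => ((PySem.Dict.mk incident).get? "incident_nature").getD ""))
  let ranked := PySem.List.sorted2 counts.items (fun x => -x.2) (fun x => x.1)
  ranked.map (fun p => (p.1, 1 + (counts.values.countP (fun c => decide (p.2 < c)) : Int)))

-- ===== PRECONDITION & SPEC =====
-- Pre_ excludes incidents lacking the key 'incident_nature', on which the Python A (and B) raise KeyError.
def Pre_calculate_incident_ranks (incidents : List (List (String × String))) : Prop :=
  (incidents.all (fun incident => incident.any (fun p => p.1 == "incident_nature"))) = true
instance (incidents : List (List (String × String))) : Decidable (Pre_calculate_incident_ranks incidents) := by unfold Pre_calculate_incident_ranks; infer_instance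
def pvWitness_calculate_incident_ranks : (List (List (String × String))) :=
  [[("incident_nature", "Theft")], [("incident_nature", "Fire"), ("city", "Norman")], [("incident_nature", "Theft")]]

def Spec_calculate_incident_ranks (incidents : List (List (String × String))) (out : List (String × Int)) : Prop := out = calculate_incident_ranks_alt incidents
instance (incidents : List (List (String × String))) (out : List (String × Int)) : Decidable (Spec_calculate_incident_ranks incidents out) := by unfold Spec_calculate_incident_ranks; infer_instance

-- ===== CLAIM (what is proved, stated in full; the proofs are below) =====
def Claim_equal_calculate_incident_ranks : Prop := ∀ (incidents : List (List (String × String))), Dom_calculate_incident_ranks incidents → Pre_calculate_incident_ranks incidents → Spec_calculate_incident_ranks incidents (calculate_incident_ranks incidents)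

-- ===== LEMMAS AND PROOFS =====

lemma pv_insertBy_pairwise {α : Type} (R : α → α → Prop) (before : α → α → Bool)
    (htr : ∀ a b c, R a b → R b c → R a c)
    (hbt : ∀ a b, before a b = true → R a b)
    (hbf : ∀ a b, before a b = false → R b a)
    (x : α) : ∀ (ys : List α), ys.Pairwise R → (PySem.List.insertBy before x ys).Pairwise R := by
  intro ys
  induction ys with
  | nil => intro _; simp [PySem.List.insertBy]
  | cons y ys ih =>
    intro hp
    rcases List.pairwise_cons.mp hp with ⟨hy, hys⟩
    rw [PySem.List.insertBy]
    by_cases hb : before x y = true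
    · simp only [hb, if_true]
      refine List.pairwise_cons.mpr ⟨?_, hp⟩
      intro z hz
      rcases List.mem_cons.mp hz with rfl | hz
      · exact hbt _ _ hb
      · exact htr _ _ _ (hbt _ _ hb) (hy _ hz)
    · simp only [hb]
      refine List.pairwise_cons.mpr ⟨?_, ih hys⟩
      intro z hz
      rcases (PySem.List.mem_insertBy before x z ys).mp hz with rfl | hz
      · exact hbf _ _ (by simpa using hb)
      · exact hy _ hz

lemma pv_foldl_insertBy_pairwise {α : Type} (R : α → α → Prop) (before : α → α → Bool)
    (htr : ∀ a b c, R a b → R b c → R a c)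
    (hbt : ∀ a b, before a b = true → R a b)
    (hbf : ∀ a b, before a b = false → R b a) :
    ∀ (xs acc : List α), acc.Pairwise R →
      (xs.foldl (fun acc x => PySem.List.insertBy before x acc) acc).Pairwise R := by
  intro xs
  induction xs with
  | nil => intro acc h; simpa using h
  | cons x xs ih =>
    intro acc h
    simpa using ih _ (pv_insertBy_pairwise R before htr hbt hbf x acc h)

-- the (-count, name) sort order leaves counts non-increasing
lemma pv_sorted2_pairwise_snd (xs : List (String × Int)) :
    (PySem.List.sorted2 xs (fun x => -x.2) (fun x => x.1)).Pairwise (fun a b => b.2 ≤ a.2) := by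
  show (xs.foldl (fun acc x => PySem.List.insertBy
      (fun a b => decide (-a.2 < -b.2) || (!decide (-b.2 < -a.2) && decide (a.1 < b.1))) x acc) []).Pairwise _
  apply pv_foldl_insertBy_pairwise
  · intro a b c h1 h2; exact le_trans h2 h1
  · intro a b h
    rcases Bool.or_eq_true _ _ |>.mp h with h | h
    · have := of_decide_eq_true h; omega
    · rw [Bool.and_eq_true, Bool.not_eq_true'] at h
      have := of_decide_eq_false h.1
      omega
  · intro a b h
    rw [Bool.or_eq_false_iff] at h
    have := of_decide_eq_false h.1
    omega
  · exact List.Pairwise.nil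

-- characterisation of A's enumerate scan
lemma pv_aLoop_items (l : List (String × Int)) : ∀ (m : Nat) (d : PySem.Dict String Int) (r c : Int),
    l.Pairwise (fun a b => b.2 ≤ a.2) →
    (∀ p ∈ l, p.2 ≤ c) →
    (∀ p ∈ l, d.contains p.1 = false) →
    (l.map Prod.fst).Nodup →
    (pvALoop l ((m : Int) + 1) d r (some c)).items
      = d.items ++ l.map (fun p => (p.1,
          (if p.2 = c then r else (m : Int) + 1) + (l.countP (fun q => decide (p.2 < q.2)) : Int))) := by
  induction l with
  | nil => intro m d r c _ _ _ _; simp [pvALoop]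
  | cons hd t ih =>
    intro m d r c hpw hle hfresh hnd
    obtain ⟨n, k⟩ := hd
    rcases List.pairwise_cons.mp hpw with ⟨hhd, hpt⟩
    have hkc : k ≤ c := hle _ (List.mem_cons_self ..)
    have hndt : (t.map Prod.fst).Nodup := (List.nodup_cons.mp (by simpa using hnd)).2
    have hnmem : n ∉ t.map Prod.fst := (List.nodup_cons.mp (by simpa using hnd)).1
    rw [pvALoop]
    have hdc : d.contains n = false := hfresh _ (List.mem_cons_self ..)
    set r' : Int := if some k ≠ some c then (m : Int) + 1 else r with hr'
    have hstep : ((m : Int) + 1) + 1 = ((m + 1 : Nat) : Int) + 1 := by push_cast; ring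
    rw [hstep, ih (m + 1) (d.insert n r') r' k hpt
        (fun p hp => hhd p hp)
        (fun p hp => by
          rw [PySem.Dict.contains_insert]
          have hne : p.1 ≠ n := fun h => hnmem (h ▸ List.mem_map_of_mem hp)
          simp [hne, hfresh p (List.mem_cons_of_mem _ hp)])
        hndt]
    rw [PySem.Dict.items_insert_of_not_contains d r' hdc]
    rw [List.append_assoc]
    congr 1
    simp only [List.map_cons, List.singleton_append]
    congr 1
    · -- the head element
      have hzero : ((n, k) :: t).countP (fun q => decide (k < q.2)) = 0 := by
        rw [List.countP_eq_zero]
        intro q hq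
        rcases List.mem_cons.mp hq with rfl | hq
        · simp
        · simp only [decide_eq_true_eq]; exact not_lt.mpr (hhd q hq)
      rw [hzero]
      simp only [hr']
      by_cases hkceq : k = c <;> simp [hkceq]
    · -- the tail elements
      apply List.map_congr_left
      intro p hp
      have hpk : p.2 ≤ k := hhd p hp
      have hcnt : ((n, k) :: t).countP (fun q => decide (p.2 < q.2))
          = t.countP (fun q => decide (p.2 < q.2)) + (if p.2 < k then 1 else 0) := by
        rw [List.countP_cons]; simp
      rw [hcnt]
      congr 1
      simp only [hr']
      by_cases h1 : p.2 = k
      · subst h1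
        by_cases h2 : p.2 = c
        · simp [h2]
        · simp [h2]
      · have hlt : p.2 < k := lt_of_le_of_ne hpk h1
        have h2 : p.2 ≠ c := by omega
        simp [h1, h2, hlt]
        omega

-- empty-items dict: A's whole loop result, characterised against B's direct rank formula
lemma pv_main (F : List (String × Int))
    (hpw : F.Pairwise (fun a b => b.2 ≤ a.2))
    (hnd : (F.map Prod.fst).Nodup) :
    (pvALoop F 1 PySem.Dict.empty 0 none).items
      = F.map (fun p => (p.1, 1 + (F.countP (fun q => decide (p.2 < q.2)) : Int))) := by
  rcases F with _ | ⟨⟨n, k⟩, t⟩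
  · simp [pvALoop, PySem.Dict.empty]
  · rcases List.pairwise_cons.mp hpw with ⟨hhd, hpt⟩
    have hndt : (t.map Prod.fst).Nodup := (List.nodup_cons.mp (by simpa using hnd)).2
    have hnmem : n ∉ t.map Prod.fst := (List.nodup_cons.mp (by simpa using hnd)).1
    rw [pvALoop]
    simp only [if_pos (by simp : some k ≠ (none : Option Int))]
    have hcall : (1 : Int) + 1 = ((1 : Nat) : Int) + 1 := by norm_num
    rw [hcall, pv_aLoop_items t 1 (PySem.Dict.empty.insert n 1) 1 k hpt
        (fun p hp => hhd p hp)
        (fun p hp => by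
          rw [PySem.Dict.contains_insert]
          have hne : p.1 ≠ n := fun h => hnmem (h ▸ List.mem_map_of_mem hp)
          simp [hne, PySem.Dict.empty])
        hndt]
    have hitems : (PySem.Dict.empty.insert n (1 : Int)).items = [(n, (1 : Int))] := by
      rw [PySem.Dict.items_insert_of_not_contains _ _ (by simp [PySem.Dict.empty])]
      simp [PySem.Dict.empty]
    rw [hitems]
    simp only [List.map_cons, List.singleton_append]
    congr 1
    · -- head element: no count is strictly greater than the maximal one
      have hzero : ((n, k) :: t).countP (fun q => decide (k < q.2)) = 0 := by
        rw [List.countP_eq_zero]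
        intro q hq
        rcases List.mem_cons.mp hq with rfl | hq
        · simp
        · simp only [decide_eq_true_eq]; exact not_lt.mpr (hhd q hq)
      simp [hzero]
    · -- tail elements
      apply List.map_congr_left
      intro p hp
      have hpk : p.2 ≤ k := hhd p hp
      have hcnt : ((n, k) :: t).countP (fun q => decide (p.2 < q.2))
          = t.countP (fun q => decide (p.2 < q.2)) + (if p.2 < k then 1 else 0) := by
        rw [List.countP_cons]; simp
      rw [hcnt]
      congr 1
      by_cases h1 : p.2 = k
      · simp [h1]
      · have hlt : p.2 < k := lt_of_le_of_ne hpk h1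
        simp [h1, hlt]
        omega

-- ===== VERDICT (by name: the statement is the Claim_ definition above) =====
theorem calculate_incident_ranks_spec : Claim_equal_calculate_incident_ranks := by
  intro incidents _ _
  show calculate_incident_ranks incidents = calculate_incident_ranks_alt incidents
  have key : ∀ (natures : List String),
      (pvALoop (PySem.List.sorted2 (PySem.Dict.counter natures).items (fun x => -x.2) (fun x => x.1)) 1 PySem.Dict.empty 0 none).items
      = (PySem.List.sorted2 (PySem.Dict.counter natures).items (fun x => -x.2) (fun x => x.1)).map
          (fun p => (p.1, 1 + ((PySem.Dict.counter natures).values.countP (fun c => decide (p.2 < c)) : Int))) := by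
    intro natures
    set counts := PySem.Dict.counter natures with hc
    set F := PySem.List.sorted2 counts.items (fun x => -x.2) (fun x => x.1) with hF
    have hperm : F.Perm counts.items := PySem.List.sorted2_perm _ _ _ _
    have hpw : F.Pairwise (fun a b => b.2 ≤ a.2) := pv_sorted2_pairwise_snd _
    have hnd : (F.map Prod.fst).Nodup := by
      have h1 : (F.map Prod.fst).Perm (counts.items.map Prod.fst) := hperm.map _
      exact h1.nodup_iff.mpr (PySem.Dict.nodup_keys_counter natures)
    have hvals : ∀ (k : Int), counts.values.countP (fun c => decide (k < c))
        = F.countP (fun q => decide (k < q.2)) := by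
      intro k
      have hv : counts.values = counts.items.map Prod.snd := rfl
      rw [hv, List.countP_map]
      exact (List.Perm.countP_eq ((fun c => decide (k < c)) ∘ Prod.snd) hperm).symm
    have hmap : F.map (fun p => (p.1, 1 + (counts.values.countP (fun c => decide (p.2 < c)) : Int)))
        = F.map (fun p => (p.1, 1 + (F.countP (fun q => decide (p.2 < q.2)) : Int))) :=
      List.map_congr_left (fun p _ => by rw [hvals p.2])
    rw [hmap]
    exact pv_main F hpw hnd
  exact key _
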